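-- pv_equiv track=rewrite | github.com/psychAo/Big-Image-Killer | large_image_split.py | count_x_y_sub_images
-- ===== SOURCE A (Python) =====
-- def count_x_y_sub_images(subsize, overlap, H_img, W_img):
--         # 计算 横x 纵y 方向上 需要提取多少个子图
--         i, j = 1, 1
--         while(True):
--             res_W = W_img - ((i*subsize) - ((i-1)*overlap))
--             if res_W <= subsize - overlap:
--                 break
--             else:
--                 i += 1
--         while(True):
--             res_H = H_img - ((j*subsize) - ((j-1)*overlap))
--             if res_H <= subsize - overlap:
--                 break
--             else:
--                 j += 1
--         return i+1, j+1  # x方向个数, y方向个数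
-- ===== SOURCE B (Python) =====
-- def count_x_y_sub_images(subsize, overlap, H_img, W_img):
--     # closed-form: the loop stops at the first i >= 1 with i*(subsize-overlap) >= W_img-subsize,
--     # i.e. i = max(1, ceil((W_img-subsize)/(subsize-overlap)))
--     step = subsize - overlap
--     i = max(1, -((subsize - W_img) // step))
--     j = max(1, -((subsize - H_img) // step))
--     return i + 1, j + 1
-- ===== Notes on version B (the rewrite author's own statement) =====
-- stated objective: simpler
-- what changed: Replaced the two counting while-loops by closed-form ceiling divisions i = max(1, ceil((W_img-subsize)/(subsize-overlap))) (and likewise for H_img).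
-- outside the precondition, e.g. on count_x_y_sub_images(5, 5, 0, 0): A returns (2, 2), B raises ZeroDivisionError; on count_x_y_sub_images(3, 5, 0, 0): A returns (2, 2), B returns (3, 3)
import Mathlib
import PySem

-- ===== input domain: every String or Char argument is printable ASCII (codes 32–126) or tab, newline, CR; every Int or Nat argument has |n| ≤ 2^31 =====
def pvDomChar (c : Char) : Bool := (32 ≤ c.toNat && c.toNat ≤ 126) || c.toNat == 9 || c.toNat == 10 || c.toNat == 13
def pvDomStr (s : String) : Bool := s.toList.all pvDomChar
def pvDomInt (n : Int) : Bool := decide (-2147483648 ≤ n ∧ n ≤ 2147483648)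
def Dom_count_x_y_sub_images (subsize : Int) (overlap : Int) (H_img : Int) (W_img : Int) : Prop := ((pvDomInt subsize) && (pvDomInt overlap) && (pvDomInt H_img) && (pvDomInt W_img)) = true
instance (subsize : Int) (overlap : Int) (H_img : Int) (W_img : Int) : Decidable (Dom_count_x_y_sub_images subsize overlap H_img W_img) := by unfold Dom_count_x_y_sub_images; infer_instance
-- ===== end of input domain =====

-- B replaces A's two counting while-loops by closed-form ceiling divisions (simpler, constant-time arithmetic).

-- ===== PORT A =====
-- A's 'while True' counting loop, step for step; fuel only makes it total
-- (inside Pre_ and Dom the loop stops long before the fuel runs out).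
def pvLoopA (subsize : Int) (overlap : Int) (dim : Int) : Nat → Int → Int
  | 0, i => i
  | Nat.succ fuel, i =>
    let res := dim - ((i * subsize) - ((i - 1) * overlap))
    if res ≤ subsize - overlap then i else pvLoopA subsize overlap dim fuel (i + 1)

def count_x_y_sub_images (subsize : Int) (overlap : Int) (H_img : Int) (W_img : Int) : List Int :=
  let i := pvLoopA subsize overlap W_img 8589934592 1
  let j := pvLoopA subsize overlap H_img 8589934592 1
  [i + 1, j + 1]

-- ===== PORT B =====
def count_x_y_sub_images_alt (subsize : Int) (overlap : Int) (H_img : Int) (W_img : Int) : List Int :=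
  let step := subsize - overlap
  let i := max 1 (-(PySem.Int.floordiv (subsize - W_img) step))
  let j := max 1 (-(PySem.Int.floordiv (subsize - H_img) step))
  [i + 1, j + 1]

-- ===== PRECONDITION & SPEC =====
-- Pre_ excludes overlap ≥ subsize: there A's loops advance by a non-positive step, so A diverges on
-- most inputs and returns an accidental (2,2) only when the very first residue test already passes,
-- while B's ceiling division has a zero divisor (Python B raises ZeroDivisionError) or a negative
-- one (B then computes an unrelated value); no tiling is possible with overlap ≥ subsize anyway.
def Pre_count_x_y_sub_images (subsize : Int) (overlap : Int) (H_img : Int) (W_img : Int) : Prop :=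
  overlap < subsize
instance (subsize : Int) (overlap : Int) (H_img : Int) (W_img : Int) : Decidable (Pre_count_x_y_sub_images subsize overlap H_img W_img) := by unfold Pre_count_x_y_sub_images; infer_instance

def pvWitness_count_x_y_sub_images : Int × Int × Int × Int := (4, 1, 10, 7)

def Spec_count_x_y_sub_images (subsize : Int) (overlap : Int) (H_img : Int) (W_img : Int) (out : List Int) : Prop := out = count_x_y_sub_images_alt subsize overlap H_img W_img
instance (subsize : Int) (overlap : Int) (H_img : Int) (W_img : Int) (out : List Int) : Decidable (Spec_count_x_y_sub_images subsize overlap H_img W_img out) := by unfold Spec_count_x_y_sub_images; infer_instance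

-- ===== CLAIM (what is proved, stated in full; the proofs are below) =====
def Claim_equal_count_x_y_sub_images : Prop := ∀ (subsize : Int) (overlap : Int) (H_img : Int) (W_img : Int), Dom_count_x_y_sub_images subsize overlap H_img W_img → Pre_count_x_y_sub_images subsize overlap H_img W_img → Spec_count_x_y_sub_images subsize overlap H_img W_img (count_x_y_sub_images subsize overlap H_img W_img)

-- ===== LEMMAS AND PROOFS =====

-- A's stop condition, rewritten: res ≤ subsize - overlap ↔ (W - subsize) ≤ i*(subsize-overlap).
theorem pvStop_iff (subsize overlap dim i : Int) :
    dim - ((i * subsize) - ((i - 1) * overlap)) ≤ subsize - overlap ↔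
      dim - subsize ≤ i * (subsize - overlap) := by
  constructor <;> intro h <;> nlinarith [h]

-- The loop from any 1 ≤ i ≤ t reaches exactly t = max 1 (ceil((dim-subsize)/step)),
-- given step > 0 and enough fuel.
theorem pvLoopA_eq (subsize overlap dim : Int) (hstep : overlap < subsize)
    (fuel : Nat) (i : Int)
    (t : Int) (ht : t = max 1 (-(PySem.Int.floordiv (subsize - dim) (subsize - overlap))))
    (hi1 : 1 ≤ i) (hit : i ≤ t) (hfuel : t - i < (fuel : Int)) :
    pvLoopA subsize overlap dim fuel i = t := by
  induction fuel generalizing i with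
  | zero => simp at hfuel; omega
  | succ f ih =>
    have hpos : (0:Int) < subsize - overlap := by omega
    -- characterize the stop condition via the floor-division bracket
    have hstop : ∀ k : Int, (dim - subsize ≤ k * (subsize - overlap)) ↔
        -(PySem.Int.floordiv (subsize - dim) (subsize - overlap)) ≤ k := by
      intro k
      rw [neg_le, PySem.Int.le_floordiv_iff_mul_le hpos]
      constructor <;> intro h <;> nlinarith [h]
    simp only [pvLoopA]
    by_cases hc : dim - ((i * subsize) - ((i - 1) * overlap)) ≤ subsize - overlap
    · -- loop stops here: i satisfies the stop condition, so t ≤ i, and i ≤ t gives i = t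
      rw [if_pos hc]
      have := (hstop i).mp ((pvStop_iff subsize overlap dim i).mp hc)
      omega
    · -- loop continues: i does not satisfy it, so i < t
      rw [if_neg hc]
      have hns := fun h => hc ((pvStop_iff subsize overlap dim i).mpr h)
      have hlt : i < t := by
        by_contra hge
        push_neg at hge
        have hie : i = t := le_antisymm hit hge
        subst hie
        -- t itself satisfies the stop condition
        apply hns
        exact (hstop _).mpr (by omega)
      exact ih (i + 1) (by omega) (by omega) (by push_cast; push_cast at hfuel; omega)

theorem pvLoopA_main (subsize overlap dim : Int) (hstep : overlap < subsize)
    (hdom1 : -2147483648 ≤ dim ∧ dim ≤ 2147483648)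
    (hdom2 : -2147483648 ≤ subsize ∧ subsize ≤ 2147483648) :
    pvLoopA subsize overlap dim 8589934592 1 =
      max 1 (-(PySem.Int.floordiv (subsize - dim) (subsize - overlap))) := by
  set t := max 1 (-(PySem.Int.floordiv (subsize - dim) (subsize - overlap))) with ht
  have hpos : (0:Int) < subsize - overlap := by omega
  -- bound t: the ceiling is at most dim - subsize when that is positive
  have hq : -(PySem.Int.floordiv (subsize - dim) (subsize - overlap)) ≤ max 1 (dim - subsize) := by
    rw [neg_le]
    apply (PySem.Int.le_floordiv_iff_mul_le hpos).mpr
    nlinarith [le_max_left 1 (dim - subsize), le_max_right 1 (dim - subsize), hpos]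
  have htb : t ≤ 4294967297 := by
    have : max 1 (dim - subsize) ≤ 4294967297 := by omega
    omega
  exact pvLoopA_eq subsize overlap dim hstep 8589934592 1 t ht (by omega) (by omega)
    (by push_cast; omega)

-- ===== VERDICT (by name: the statement is the Claim_ definition above) =====
theorem count_x_y_sub_images_spec : Claim_equal_count_x_y_sub_images := by
  intro subsize overlap H_img W_img hdom hpre
  unfold Spec_count_x_y_sub_images count_x_y_sub_images count_x_y_sub_images_alt
  unfold Dom_count_x_y_sub_images at hdom
  simp only [pvDomInt, Bool.and_eq_true, decide_eq_true_eq] at hdom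
  obtain ⟨⟨⟨hs, ho⟩, hH⟩, hW⟩ := hdom
  rw [pvLoopA_main subsize overlap W_img hpre hW hs,
      pvLoopA_main subsize overlap H_img hpre hH hs]
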